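-- pv_equiv track=rewrite | github.com/fredflys/Learning-Python | CS61A/Tree Recursion.py | knapsack_count
-- ===== SOURCE A (Python) =====
-- def knapsack_count(weight, items):
--     """
--     :param weight: maximum weight of the knapsack
--     :param items: [(worth, weight), (worth, weight)]
--     :return: how many ways we can fill the knapsack without going over the weight limit
--     >>> knapsack_count(-1, [(10, 2)])
--     0
--     >>> knapsack_count(3, [])
--     1
--     >>> knapsack_count(10, [(1, 4), (2, 5)])
--     4
--     """
--     if weight < 0:
--         return 0
--     if len(items) == 0:
--         return 1
--     with_first_item = knapsack_count(weight - items[0][1], items[1:])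
--     without_first_item = knapsack_count(weight, items[1:])
--     return with_first_item + without_first_item
-- ===== SOURCE B (Python) =====
-- def knapsack_count(weight, items):
--     """
--     :param weight: maximum weight of the knapsack
--     :param items: [(worth, weight), (worth, weight)]
--     :return: how many ways we can fill the knapsack without going over the weight limit
--     """
--     if weight < 0:
--         return 0
--     counts = {weight: 1}
--     for _, w in items:
--         nxt = dict(counts)
--         for rem, c in counts.items():
--             r = rem - w
--             if r >= 0:
--                 nxt[r] = nxt.get(r, 0) + c
--         counts = nxt
--     return sum(counts.values())
-- ===== Notes on version B (the rewrite author's own statement) =====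
-- stated objective: alternative
-- what changed: Replaces A's take/skip branch recursion by a single left-to-right pass maintaining a dict from remaining capacity to number of subsets (merging equal remainders, dropping negative ones per step) and summing its counts at the end.
import Mathlib
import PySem

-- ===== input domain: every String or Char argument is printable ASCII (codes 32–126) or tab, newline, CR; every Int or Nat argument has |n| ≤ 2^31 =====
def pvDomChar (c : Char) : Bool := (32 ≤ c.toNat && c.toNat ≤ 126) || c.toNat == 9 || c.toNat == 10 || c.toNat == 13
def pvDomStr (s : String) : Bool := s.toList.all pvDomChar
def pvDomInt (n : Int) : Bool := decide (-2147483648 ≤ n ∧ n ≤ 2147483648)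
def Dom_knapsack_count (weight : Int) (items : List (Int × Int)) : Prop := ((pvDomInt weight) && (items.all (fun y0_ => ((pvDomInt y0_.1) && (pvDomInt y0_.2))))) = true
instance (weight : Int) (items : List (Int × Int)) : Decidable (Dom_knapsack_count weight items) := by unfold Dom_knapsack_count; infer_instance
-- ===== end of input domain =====

-- B replaces A's exponential take/skip branch recursion by a one-pass dict DP over the
-- remaining capacities (merging equal remainders, dropping negative ones per step).

-- ===== PORT A =====
def knapsack_count (weight : Int) (items : List (Int × Int)) : Int :=
  if weight < 0 then 0
  else match items with
    | [] => 1
    | first :: rest => knapsack_count (weight - first.2) rest + knapsack_count weight rest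

-- ===== PORT B =====
-- inner loop body: for rem, c in counts.items(): r = rem - w; if r >= 0: nxt[r] = nxt.get(r, 0) + c
def pvUpd (w : Int) (nxt : PySem.Dict Int Int) (rc : Int × Int) : PySem.Dict Int Int :=
  if 0 ≤ rc.1 - w then nxt.insert (rc.1 - w) (nxt.getD (rc.1 - w) 0 + rc.2) else nxt

-- one item step: nxt = dict(counts); inner loop over counts.items()
def pvStep (counts : PySem.Dict Int Int) (item : Int × Int) : PySem.Dict Int Int :=
  counts.items.foldl (pvUpd item.2) counts

def knapsack_count_alt (weight : Int) (items : List (Int × Int)) : Int :=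
  if weight < 0 then 0
  else ((items.foldl pvStep (PySem.Dict.empty.insert weight 1)).values).sum

-- ===== PRECONDITION & SPEC =====
def Spec_knapsack_count (weight : Int) (items : List (Int × Int)) (out : Int) : Prop := out = knapsack_count_alt weight items
instance (weight : Int) (items : List (Int × Int)) (out : Int) : Decidable (Spec_knapsack_count weight items out) := by unfold Spec_knapsack_count; infer_instance

-- ===== CLAIM (what is proved, stated in full; the proofs are below) =====
def Claim_equal_knapsack_count : Prop := ∀ (weight : Int) (items : List (Int × Int)), Dom_knapsack_count weight items → Spec_knapsack_count weight items (knapsack_count weight items)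

-- ===== LEMMAS AND PROOFS =====

-- weighted sum of a dict's entries: Σ count * f key
def pvG (l : List (Int × Int)) (f : Int → Int) : Int := (l.map (fun p => p.2 * f p.1)).sum

theorem pvA_neg (weight : Int) (items : List (Int × Int)) (h : weight < 0) :
    knapsack_count weight items = 0 := by
  unfold knapsack_count; simp [h]

theorem pvA_nil (weight : Int) (h : ¬ weight < 0) : knapsack_count weight [] = 1 := by
  unfold knapsack_count; simp [h]

theorem pvA_cons (weight : Int) (x : Int × Int) (rest : List (Int × Int)) (h : ¬ weight < 0) :
    knapsack_count weight (x :: rest)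
      = knapsack_count (weight - x.2) rest + knapsack_count weight rest := by
  conv_lhs => rw [knapsack_count]
  simp [h]

theorem pvG_map_update (l : List (Int × Int)) (k v v0 : Int) (f : Int → Int)
    (hnd : (l.map Prod.fst).Nodup) (hmem : (k, v0) ∈ l) :
    pvG (l.map (fun p => if p.1 == k then (k, v) else p)) f = pvG l f - v0 * f k + v * f k := by
  induction l with
  | nil => simp at hmem
  | cons p t ih =>
    simp only [List.map_cons, List.nodup_cons] at hnd
    by_cases hk : p.1 = k
    · have hval : p = (k, v0) := by
        rcases List.mem_cons.mp hmem with hp | ht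
        · exact hp.symm
        · exact absurd (hk ▸ List.mem_map_of_mem (f := Prod.fst) ht) hnd.1
      have htid : t.map (fun q : Int × Int => if q.1 == k then (k, v) else q) = t := by
        rw [show t.map (fun q : Int × Int => if q.1 == k then (k, v) else q) = t.map id from
              List.map_congr_left ?_, List.map_id]
        intro q hq
        have hqk : q.1 ≠ k := by
          intro h
          exact hnd.1 (by rw [hk, ← h]; exact List.mem_map_of_mem (f := Prod.fst) hq)
        simp [hqk]
      unfold pvG
      simp only [List.map_cons, List.sum_cons, htid, hval]
      simp
      ring
    · have ht : (k, v0) ∈ t := by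
        rcases List.mem_cons.mp hmem with hp | ht
        · exact absurd (by rw [← hp]) hk
        · exact ht
      have hupd : (if p.1 == k then ((k, v) : Int × Int) else p) = p := by simp [hk]
      unfold pvG at ih ⊢
      simp only [List.map_cons, List.sum_cons, hupd]
      rw [ih hnd.2 ht]
      ring

theorem pvG_insert (d : PySem.Dict Int Int) (k c : Int) (f : Int → Int)
    (hnd : d.keys.Nodup) :
    pvG (d.insert k (d.getD k 0 + c)).items f = pvG d.items f + c * f k := by
  by_cases hc : d.contains k = true
  · have hkk : k ∈ d.keys := (PySem.Dict.contains_iff_mem_keys d k).mp hc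
    have hex : ∃ v0, (k, v0) ∈ d.items := by
      simp only [PySem.Dict.keys, List.mem_map] at hkk
      obtain ⟨p, hp, hpk⟩ := hkk
      exact ⟨p.2, by rwa [← hpk, Prod.mk.eta]⟩
    obtain ⟨v0, hv0⟩ := hex
    have hgd : d.getD k 0 = v0 := PySem.Dict.getD_of_mem_items d hv0 hnd 0
    rw [PySem.Dict.items_insert_of_contains d _ hc,
        pvG_map_update d.items k (d.getD k 0 + c) v0 f hnd hv0, hgd]
    ring
  · have hc' : d.contains k = false := by simpa using hc
    rw [PySem.Dict.items_insert_of_not_contains d _ hc',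
        PySem.Dict.getD_of_not_contains d 0 hc']
    simp [pvG]

theorem pv_nodup_upd (w : Int) (nxt : PySem.Dict Int Int) (rc : Int × Int)
    (h : nxt.keys.Nodup) : (pvUpd w nxt rc).keys.Nodup := by
  unfold pvUpd; split
  · exact PySem.Dict.nodup_keys_insert _ _ _ h
  · exact h

theorem pv_nodup_fold (w : Int) (l : List (Int × Int)) :
    ∀ nxt : PySem.Dict Int Int, nxt.keys.Nodup → (l.foldl (pvUpd w) nxt).keys.Nodup := by
  induction l with
  | nil => intro nxt h; simpa using h
  | cons rc t ih => intro nxt h; exact ih _ (pv_nodup_upd w nxt rc h)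

theorem pv_nonneg_upd (w : Int) (nxt : PySem.Dict Int Int) (rc : Int × Int)
    (h : ∀ p ∈ nxt.items, 0 ≤ p.1) : ∀ p ∈ (pvUpd w nxt rc).items, 0 ≤ p.1 := by
  unfold pvUpd; split
  · intro p hp
    rcases (PySem.Dict.mem_items_insert _ _ _ _).mp hp with hp1 | ⟨hp2, _⟩
    · rw [hp1]; assumption
    · exact h p hp2
  · exact h

theorem pv_nonneg_fold (w : Int) (l : List (Int × Int)) :
    ∀ nxt : PySem.Dict Int Int, (∀ p ∈ nxt.items, 0 ≤ p.1) →
      ∀ p ∈ (l.foldl (pvUpd w) nxt).items, 0 ≤ p.1 := by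
  induction l with
  | nil => intro nxt h; simpa using h
  | cons rc t ih => intro nxt h; exact ih _ (pv_nonneg_upd w nxt rc h)

theorem pvG_fold (w : Int) (f : Int → Int) (l : List (Int × Int)) :
    ∀ nxt : PySem.Dict Int Int, nxt.keys.Nodup →
      pvG (l.foldl (pvUpd w) nxt).items f
        = pvG nxt.items f + (l.map (fun rc => if 0 ≤ rc.1 - w then rc.2 * f (rc.1 - w) else 0)).sum := by
  induction l with
  | nil => intro nxt _; simp
  | cons rc t ih =>
    intro nxt hnd
    simp only [List.foldl_cons, List.map_cons, List.sum_cons]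
    rw [ih _ (pv_nodup_upd w nxt rc hnd)]
    have : pvG (pvUpd w nxt rc).items f
        = pvG nxt.items f + (if 0 ≤ rc.1 - w then rc.2 * f (rc.1 - w) else 0) := by
      unfold pvUpd; split
      · rw [pvG_insert nxt _ rc.2 f hnd]
      · simp
    rw [this]; ring

-- the DP invariant: running the remaining items over a nonneg-key dict computes Σ count * A key rest
theorem pv_main (items : List (Int × Int)) :
    ∀ d : PySem.Dict Int Int, d.keys.Nodup → (∀ p ∈ d.items, 0 ≤ p.1) →
      ((items.foldl pvStep d).values).sum = pvG d.items (fun k => knapsack_count k items) := by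
  induction items with
  | nil =>
    intro d _ hpos
    have : pvG d.items (fun k => knapsack_count k []) = pvG d.items (fun _ => 1) := by
      unfold pvG
      congr 1
      apply List.map_congr_left
      intro p hp
      dsimp only
      rw [pvA_nil p.1 (by have := hpos p hp; omega)]
    simp only [List.foldl_nil, this]
    simp [pvG, PySem.Dict.values]
  | cons x t ih =>
    intro d hnd hpos
    simp only [List.foldl_cons]
    rw [ih (pvStep d x) (pv_nodup_fold x.2 d.items d hnd) (pv_nonneg_fold x.2 d.items d hpos)]
    show pvG (d.items.foldl (pvUpd x.2) d).items _ = _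
    rw [pvG_fold x.2 _ d.items d hnd]
    unfold pvG
    rw [← List.sum_map_add]
    congr 1
    apply List.map_congr_left
    intro p hp
    dsimp only
    have hp0 : ¬ p.1 < 0 := by have := hpos p hp; omega
    rw [pvA_cons p.1 x t hp0]
    by_cases hr : 0 ≤ p.1 - x.2
    · rw [if_pos hr]; ring
    · rw [if_neg hr, pvA_neg (p.1 - x.2) t (by omega)]; ring

-- ===== VERDICT (by name: the statement is the Claim_ definition above) =====
theorem knapsack_count_spec : Claim_equal_knapsack_count := by
  intro weight items _
  unfold Spec_knapsack_count knapsack_count_alt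
  by_cases hw : weight < 0
  · simp [hw, pvA_neg weight items hw]
  · simp only [hw, if_false]
    rw [pv_main items (PySem.Dict.empty.insert weight 1)
          (PySem.Dict.nodup_keys_insert _ _ _ PySem.Dict.nodup_keys_empty)
          (by intro p hp
              rcases (PySem.Dict.mem_items_insert _ _ _ _).mp hp with h1 | ⟨h2, _⟩
              · rw [h1]; omega
              · simp [PySem.Dict.empty] at h2)]
    have : (PySem.Dict.empty.insert weight 1).items = [(weight, (1 : Int))] := by
      rw [PySem.Dict.items_insert_of_not_contains _ _ (PySem.Dict.contains_empty weight)]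
      simp [PySem.Dict.empty]
    rw [this]
    simp [pvG]
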